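-- pv_equiv track=rewrite | github.com/Opentrons/Protocols | data/scripts/analyze_fields.py | check_double_searches
-- ===== SOURCE A (Python) =====
-- def check_double_searches(searches):
--     valid_searches = []
--     for search in searches:
--         valid = True
--         for check in searches:
--             if search in check and search != check:
--                 valid = False
--                 break
--         if valid:
--             valid_searches.append(search)
--     return valid_searches
-- ===== SOURCE B (Python) =====
-- def check_double_searches(searches):
--     # A string is kept iff it is "maximal": contained in no distinct element.
--     # Every non-maximal string is contained in some maximal one, so build the
--     # maximal set by scanning distinct strings from longest to shortest,
--     # checking each only against the already-kept (longer) maximal strings,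
--     # then keep the input elements that belong to that set.
--     maximal = []
--     for s in sorted(dict.fromkeys(searches), key=len, reverse=True):
--         if not any(s in m for m in maximal):
--             maximal.append(s)
--     keep = set(maximal)
--     return [s for s in searches if s in keep]
-- ===== Notes on version B (the rewrite author's own statement) =====
-- stated objective: faster
-- what changed: A compares every element against the whole list with a nested scan; B sorts the distinct strings by length descending, incrementally builds the set of maximal strings by checking each candidate only against the already-kept maximal ones (correct because every properly contained string is contained in some maximal string), then filters the input by membership in that set.
import Mathlib
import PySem

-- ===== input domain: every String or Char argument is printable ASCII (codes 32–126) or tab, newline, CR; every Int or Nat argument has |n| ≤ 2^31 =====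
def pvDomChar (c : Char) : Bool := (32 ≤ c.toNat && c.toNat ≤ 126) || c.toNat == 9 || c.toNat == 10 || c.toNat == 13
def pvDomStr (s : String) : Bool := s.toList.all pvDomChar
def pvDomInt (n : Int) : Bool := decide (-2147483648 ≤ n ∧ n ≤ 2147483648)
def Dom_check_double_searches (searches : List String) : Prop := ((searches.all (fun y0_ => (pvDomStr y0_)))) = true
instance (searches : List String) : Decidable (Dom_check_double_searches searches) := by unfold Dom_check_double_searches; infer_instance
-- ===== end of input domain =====

-- B replaces A's all-pairs scan by: sort the distinct strings by length descending,
-- build the set of maximal strings checking each candidate only against the kept ones,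
-- then filter the input by membership in that set.

-- ===== PORT A =====
-- inner 'for check in searches: … break' loop of A: returns the final 'valid'
def pvInnerA (search : String) : List String → Bool
  | [] => true
  | check :: rest =>
      if PySem.Str.isIn search check && search != check then false
      else pvInnerA search rest

def check_double_searches (searches : List String) : List String :=
  searches.foldl
    (fun valid_searches search =>
      if pvInnerA search searches then valid_searches ++ [search] else valid_searches)
    []

-- ===== PORT B =====
-- the 'for s in …: if not any(…): maximal.append(s)' loop of B
def pvStepB (M : List String) (s : String) : List String :=
  if M.any (fun m => PySem.Str.isIn s m) then M else M ++ [s]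

def check_double_searches_alt (searches : List String) : List String :=
  let ordered := PySem.List.sorted (PySem.List.dedup searches) PySem.Str.len true
  let maximal := ordered.foldl pvStepB []
  let keep := PySem.Set.ofList maximal
  searches.filter (fun s => PySem.Set.contains keep s)

-- ===== PRECONDITION & SPEC =====
def Spec_check_double_searches (searches : List String) (out : List String) : Prop := out = check_double_searches_alt searches
instance (searches : List String) (out : List String) : Decidable (Spec_check_double_searches searches out) := by unfold Spec_check_double_searches; infer_instance

-- ===== CLAIM (what is proved, stated in full; the proofs are below) =====
def Claim_equal_check_double_searches : Prop := ∀ (searches : List String), Dom_check_double_searches searches → Spec_check_double_searches searches (check_double_searches searches)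

-- ===== LEMMAS AND PROOFS =====

-- 's is maximal': no element of the list properly contains s
def pvMaximal (searches : List String) (s : String) : Prop :=
  ∀ c ∈ searches, PySem.Str.isIn s c = true → s = c

-- proper containment forces strictly smaller length
theorem pv_proper_lt (s c : String) (hin : PySem.Str.isIn s c = true) (hne : s ≠ c) :
    PySem.Str.len s < PySem.Str.len c := by
  rw [PySem.Str.isIn_iff_infix] at hin
  rw [PySem.Str.len_eq, PySem.Str.len_eq]
  have hle := hin.length_le
  rcases lt_or_eq_of_le hle with h | h
  · exact_mod_cast h
  · exact absurd (String.toList_inj.mp (hin.eq_of_length h)) hne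

-- every properly contained string is contained in some maximal string
theorem pv_exists_maximal (searches : List String) (s d : String)
    (hd : d ∈ searches) (hin : PySem.Str.isIn s d = true) (hne : s ≠ d) :
    ∃ m ∈ searches, PySem.Str.isIn s m = true ∧ PySem.Str.len s < PySem.Str.len m ∧
      pvMaximal searches m := by
  set F := searches.filter (fun c => PySem.Str.isIn s c && s != c) with hF
  have hdF : d ∈ F := by
    rw [hF, List.mem_filter]
    exact ⟨hd, by rw [Bool.and_eq_true, bne_iff_ne]; exact ⟨hin, hne⟩⟩
  have hFne : F ≠ [] := List.ne_nil_of_mem hdF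
  obtain ⟨m, hm⟩ := Option.ne_none_iff_exists'.mp
    (fun h => hFne (List.argmax_eq_none.mp h) : List.argmax PySem.Str.len F ≠ none)
  have hmF : m ∈ F := List.argmax_mem hm
  rw [hF, List.mem_filter, Bool.and_eq_true, bne_iff_ne] at hmF
  obtain ⟨hms, hmin, hmne⟩ := hmF
  refine ⟨m, hms, hmin, pv_proper_lt s m hmin hmne, ?_⟩
  intro c hc hmc
  by_contra hne2
  have hlt : PySem.Str.len m < PySem.Str.len c := pv_proper_lt m c hmc hne2
  have hsc : PySem.Str.isIn s c = true := by
    rw [PySem.Str.isIn_iff_infix] at *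
    exact hmin.trans hmc
  have hsnec : s ≠ c := by
    intro h; subst h
    have := pv_proper_lt s m hmin hmne
    omega
  have hcF : c ∈ F := by
    rw [hF, List.mem_filter]
    exact ⟨hc, by rw [Bool.and_eq_true, bne_iff_ne]; exact ⟨hsc, hsnec⟩⟩
  have := List.le_of_mem_argmax hcF hm
  omega

-- A's inner loop returns true iff s is maximal
theorem pv_innerA_iff (s : String) (l : List String) :
    pvInnerA s l = true ↔ pvMaximal l s := by
  induction l with
  | nil => simp [pvInnerA, pvMaximal]
  | cons c rest ih =>
      simp only [pvInnerA, pvMaximal, List.mem_cons]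
      by_cases h : (PySem.Str.isIn s c && s != c) = true
      · rw [if_pos h]
        simp only [Bool.and_eq_true, bne_iff_ne] at h
        constructor
        · intro hfalse; cases hfalse
        · intro hall; exact absurd (hall c (Or.inl rfl) h.1) h.2
      · rw [if_neg h, ih]
        simp only [Bool.and_eq_true, bne_iff_ne, not_and] at h
        constructor
        · intro hrest x hx hin
          rcases hx with rfl | hx
          · by_contra hne; exact h hin hne
          · exact hrest x hx hin
        · intro hall x hx hin; exact hall x (Or.inr hx) hin

-- fold invariant for B's maximal-set construction
theorem pv_fold_spec (searches : List String) : ∀ (l acc : List String),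
    (∀ x ∈ l, x ∈ searches) →
    l.Pairwise (fun a b => PySem.Str.len b ≤ PySem.Str.len a) →
    l.Nodup →
    (∀ m ∈ acc, m ∉ l) →
    (∀ m ∈ acc, m ∈ searches ∧ pvMaximal searches m) →
    (∀ m ∈ searches, pvMaximal searches m → m ∉ l → m ∈ acc) →
    ∀ x, (x ∈ l.foldl pvStepB acc ↔ x ∈ acc ∨ (x ∈ l ∧ pvMaximal searches x)) := by
  intro l
  induction l with
  | nil => intro acc _ _ _ _ _ _ x; simp
  | cons s rest ih =>
      intro acc hsub hpw hnd hdisj haccmax hcompl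
      rw [List.pairwise_cons] at hpw
      rw [List.nodup_cons] at hnd
      have hsmem : s ∈ searches := hsub s (List.mem_cons_self ..)
      intro x
      rw [List.foldl_cons]
      by_cases hany : acc.any (fun m => PySem.Str.isIn s m) = true
      · -- skip: some kept maximal string contains s, so s is not maximal
        obtain ⟨m, hmacc, hmin⟩ := List.any_eq_true.mp hany
        have hmne : m ≠ s := by
          intro h; subst h; exact hdisj m hmacc (List.mem_cons_self ..)
        have hnotmax : ¬ pvMaximal searches s := by
          intro hmax
          exact hmne ((hmax m (haccmax m hmacc).1 hmin).symm)
        rw [pvStepB, if_pos hany]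
        rw [ih acc (fun y hy => hsub y (List.mem_cons_of_mem _ hy))
          hpw.2 hnd.2
          (fun m hm => fun hmr => hdisj m hm (List.mem_cons_of_mem _ hmr))
          haccmax
          (fun m hm hmmax hmr => by
            by_cases hms : m = s
            · subst hms; exact absurd hmmax hnotmax
            · exact hcompl m hm hmmax (by
                intro hx; rcases List.mem_cons.mp hx with h | h
                · exact hms h
                · exact hmr h)) x]
        constructor
        · rintro (h | ⟨h1, h2⟩)
          · exact Or.inl h
          · exact Or.inr ⟨List.mem_cons_of_mem _ h1, h2⟩
        · rintro (h | ⟨h1, h2⟩)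
          · exact Or.inl h
          · rcases List.mem_cons.mp h1 with rfl | h1
            · exact absurd h2 hnotmax
            · exact Or.inr ⟨h1, h2⟩
      · -- append: s is maximal (otherwise its maximal superstring would be in acc)
        have hmax : pvMaximal searches s := by
          by_contra hnm
          have : ∃ d ∈ searches, PySem.Str.isIn s d = true ∧ s ≠ d := by
            rw [pvMaximal] at hnm
            push Not at hnm
            obtain ⟨d, hd1, hd2, hd3⟩ := hnm
            exact ⟨d, hd1, hd2, hd3⟩
          obtain ⟨d, hd1, hd2, hd3⟩ := this
          obtain ⟨m, hm1, hm2, hm3, hm4⟩ := pv_exists_maximal searches s d hd1 hd2 hd3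
          have hmnl : m ∉ s :: rest := by
            intro hx
            rcases List.mem_cons.mp hx with rfl | hx
            · omega
            · have := hpw.1 m hx; omega
          have hmacc := hcompl m hm1 hm4 hmnl
          exact hany (List.any_eq_true.mpr ⟨m, hmacc, hm2⟩)
        rw [pvStepB, if_neg hany]
        rw [ih (acc ++ [s]) (fun y hy => hsub y (List.mem_cons_of_mem _ hy))
          hpw.2 hnd.2
          (fun m hm hmr => by
            rcases List.mem_append.mp hm with h | h
            · exact hdisj m h (List.mem_cons_of_mem _ hmr)
            · rw [List.mem_singleton] at h; subst h; exact hnd.1 hmr)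
          (fun m hm => by
            rcases List.mem_append.mp hm with h | h
            · exact haccmax m h
            · rw [List.mem_singleton] at h; subst h; exact ⟨hsmem, hmax⟩)
          (fun m hm hmmax hmr => by
            by_cases hms : m = s
            · subst hms; exact List.mem_append.mpr (Or.inr (List.mem_singleton.mpr rfl))
            · exact List.mem_append.mpr (Or.inl (hcompl m hm hmmax (by
                intro hx; rcases List.mem_cons.mp hx with h | h
                · exact hms h
                · exact hmr h))) ) x]
        simp only [List.mem_append, List.mem_cons, List.not_mem_nil, or_false]
        constructor
        · rintro ((h | rfl) | ⟨h1, h2⟩)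
          · exact Or.inl h
          · exact Or.inr ⟨Or.inl rfl, hmax⟩
          · exact Or.inr ⟨Or.inr h1, h2⟩
        · rintro (h | ⟨rfl | h1, h2⟩)
          · exact Or.inl (Or.inl h)
          · exact Or.inl (Or.inr rfl)
          · exact Or.inr ⟨h1, h2⟩

-- the built list is exactly the maximal strings
theorem pv_maximal_mem (searches : List String) (x : String) :
    (x ∈ (PySem.List.sorted (PySem.List.dedup searches) PySem.Str.len true).foldl pvStepB [])
      ↔ x ∈ searches ∧ pvMaximal searches x := by
  set ordered := PySem.List.sorted (PySem.List.dedup searches) PySem.Str.len true with ho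
  have hmemo : ∀ y, y ∈ ordered ↔ y ∈ searches := by
    intro y
    rw [ho, PySem.List.mem_sorted, PySem.List.mem_dedup]
  rw [pv_fold_spec searches ordered []
    (fun y hy => (hmemo y).mp hy)
    (PySem.List.sorted_pairwise_rev _ _)
    ((PySem.List.sorted_perm _ _ _).nodup_iff.mpr (PySem.List.nodup_dedup _))
    (by intro m hm; cases hm)
    (by intro m hm; cases hm)
    (fun m hm hmmax hmo => absurd ((hmemo m).mpr hm) hmo) x]
  simp [hmemo x]

-- ===== VERDICT (by name: the statement is the Claim_ definition above) =====
theorem check_double_searches_spec : Claim_equal_check_double_searches := by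
  intro searches _
  unfold Spec_check_double_searches check_double_searches check_double_searches_alt
  rw [PySem.List.foldl_append_if_eq_filter]
  simp only [List.nil_append]
  refine List.filter_congr (fun s hs => ?_)
  rw [Bool.eq_iff_iff, pv_innerA_iff, PySem.Set.contains_iff, PySem.Set.mem_ofList,
    pv_maximal_mem]
  exact ⟨fun h => ⟨hs, h⟩, fun h => h.2⟩
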